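-- pv_equiv track=rewrite | github.com/radekmilicka-code/InvoiceApp1 | qr_generator.py | _encode_bytes
-- ===== SOURCE A (Python) =====
-- def _encode_bytes(data):
--     encoded = data.encode('utf-8') if isinstance(data, str) else data
--     bits = []
--     # Mode indicator: byte = 0100
--     bits += [0,1,0,0]
--     n = len(encoded)
--     # Character count: 8 bits for version 1-9
--     for i in range(7,-1,-1):
--         bits.append((n >> i) & 1)
--     for byte in encoded:
--         for i in range(7,-1,-1):
--             bits.append((byte >> i) & 1)
--     return bits
-- ===== SOURCE B (Python) =====
-- def _encode_bytes(data):
--     encoded = data.encode('utf-8') if isinstance(data, str) else data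
--     # accumulate the whole message in one big integer, then extract bits once
--     acc = 0b0100
--     acc = (acc << 8) | (len(encoded) & 0xFF)
--     for byte in encoded:
--         acc = (acc << 8) | byte
--     total = 12 + 8 * len(encoded)
--     return [(acc >> (total - 1 - i)) & 1 for i in range(total)]
-- ===== Notes on version B (the rewrite author's own statement) =====
-- stated objective: alternative
-- what changed: Instead of appending bits byte-by-byte with a nested shift-and-mask loop per byte, B packs the mode nibble, the masked length and all payload bytes into a single big-integer accumulator and extracts all bits in one final comprehension.
import Mathlib
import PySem

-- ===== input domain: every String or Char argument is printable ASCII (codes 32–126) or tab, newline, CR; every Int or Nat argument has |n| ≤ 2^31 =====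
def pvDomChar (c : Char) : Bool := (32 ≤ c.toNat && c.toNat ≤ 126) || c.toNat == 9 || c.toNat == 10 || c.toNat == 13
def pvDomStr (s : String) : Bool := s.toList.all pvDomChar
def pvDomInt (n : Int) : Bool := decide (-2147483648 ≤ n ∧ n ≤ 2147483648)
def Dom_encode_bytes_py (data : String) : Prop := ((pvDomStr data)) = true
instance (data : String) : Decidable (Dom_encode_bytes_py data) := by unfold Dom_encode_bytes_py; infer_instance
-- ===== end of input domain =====

-- B packs mode nibble, masked length and payload bytes into one integer accumulator and
-- extracts all bits in a single final pass, instead of A's per-byte shift-and-mask loops.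

-- ===== PORT A =====
-- data.encode('utf-8'): on the ASCII domain the bytes are exactly the character codes
def encode_bytes_py (data : String) : List Int :=
  let encoded : List Int := data.toList.map (fun c => (c.toNat : Int))
  let bits : List Int := []
  -- bits += [0,1,0,0]
  let bits := bits ++ [0, 1, 0, 0]
  let n : Int := encoded.length
  -- for i in range(7,-1,-1): bits.append((n >> i) & 1)   (i is nonnegative throughout)
  let bits := (PySem.List.pyRange 7 (-1) (-1)).foldl
    (fun acc i => acc ++ [PySem.Int.band (n >>> i.toNat) 1]) bits
  -- for byte in encoded: for i in range(7,-1,-1): bits.append((byte >> i) & 1)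
  let bits := encoded.foldl
    (fun acc (byte : Int) => (PySem.List.pyRange 7 (-1) (-1)).foldl
      (fun acc2 i => acc2 ++ [PySem.Int.band (byte >>> i.toNat) 1]) acc) bits
  bits

-- ===== PORT B =====
def encode_bytes_py_alt (data : String) : List Int :=
  let encoded : List Int := data.toList.map (fun c => (c.toNat : Int))
  -- acc = 0b0100
  let acc : Int := 4
  -- acc = (acc << 8) | (len(encoded) & 0xFF)
  let acc : Int := PySem.Int.bor (acc <<< 8) (PySem.Int.band (encoded.length : Int) 255)
  -- for byte in encoded: acc = (acc << 8) | byte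
  let acc : Int := encoded.foldl (fun a byte => PySem.Int.bor (a <<< 8) byte) acc
  let total : Int := 12 + 8 * (encoded.length : Int)
  -- [(acc >> (total-1-i)) & 1 for i in range(total)]   (total-1-i is nonnegative throughout)
  (PySem.List.pyRange 0 total 1).map
    (fun i => PySem.Int.band (acc >>> (total - 1 - i).toNat) 1)

-- ===== PRECONDITION & SPEC =====
def Spec_encode_bytes_py (data : String) (out : List Int) : Prop := out = encode_bytes_py_alt data
instance (data : String) (out : List Int) : Decidable (Spec_encode_bytes_py data out) := by unfold Spec_encode_bytes_py; infer_instance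

-- ===== CLAIM (what is proved, stated in full; the proofs are below) =====
def Claim_equal_encode_bytes_py : Prop := ∀ (data : String), Dom_encode_bytes_py data → Spec_encode_bytes_py data (encode_bytes_py data)

-- ===== LEMMAS AND PROOFS =====

-- the big-endian list of the low t bits of a (bit t-1-i at position i)
def bitsN (t a : Nat) : List Int :=
  (List.range t).map (fun i => (((a >>> (t - 1 - i)) % 2 : Nat) : Int))

theorem lor256 (a b : Nat) (h : b < 256) : (a <<< 8) ||| b = a * 256 + b := by
  apply Nat.eq_of_testBit_eq
  intro i
  rw [Nat.testBit_lor, Nat.testBit_shiftLeft]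
  have h2 : a * 256 + b = 2 ^ 8 * a + b := by ring_nf
  rw [h2, Nat.testBit_two_pow_mul_add a (by simpa using h)]
  by_cases hi : i < 8
  · simp [hi, Nat.not_le.mpr hi]
  · simp [hi, Nat.le_of_not_lt hi, Nat.testBit_eq_false_of_lt
      (show b < 2 ^ i from lt_of_lt_of_le h (by
        calc (256 : Nat) = 2 ^ 8 := by norm_num
          _ ≤ 2 ^ i := Nat.pow_le_pow_right (by norm_num) (Nat.le_of_not_lt hi)))]

theorem bitsN_step (t a b : Nat) (hb : b < 256) :
    bitsN (t + 8) (a * 256 + b) = bitsN t a ++ bitsN 8 b := by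
  unfold bitsN
  rw [List.range_add, List.map_append, List.map_map]
  congr 1
  · apply List.map_congr_left
    intro i hi
    rw [List.mem_range] at hi
    have hsh : t + 8 - 1 - i = (t - 1 - i) + 8 := by omega
    rw [hsh]
    congr 2
    rw [Nat.shiftRight_eq_div_pow, Nat.shiftRight_eq_div_pow, pow_add,
      show (2 : Nat) ^ 8 = 256 from by norm_num,
      show (2 : Nat) ^ (t - 1 - i) * 256 = 256 * 2 ^ (t - 1 - i) from Nat.mul_comm _ _,
      ← Nat.div_div_eq_div_mul, show (a * 256 + b) / 256 = a from by omega]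
  · apply List.map_congr_left
    intro j hj
    rw [List.mem_range] at hj
    simp only [Function.comp]
    have hsh : t + 8 - 1 - (t + j) = 7 - j := by omega
    rw [hsh]
    congr 1
    rw [Nat.shiftRight_eq_div_pow, Nat.shiftRight_eq_div_pow]
    interval_cases j <;> norm_num <;> omega

theorem bitsN_eight_mod (n : Nat) : bitsN 8 n = bitsN 8 (n % 256) := by
  unfold bitsN
  apply List.map_congr_left
  intro j hj
  rw [List.mem_range] at hj
  congr 1
  rw [Nat.shiftRight_eq_div_pow, Nat.shiftRight_eq_div_pow]
  interval_cases j <;> norm_num <;> omega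

theorem bitsN_fold (bs : List Nat) (hb : ∀ b ∈ bs, b < 256) (t a : Nat) :
    bitsN (t + 8 * bs.length) (bs.foldl (fun x b => x * 256 + b) a)
      = bitsN t a ++ bs.flatMap (fun b => bitsN 8 b) := by
  induction bs generalizing t a with
  | nil => simp
  | cons b bs ih =>
    have hb' : b < 256 := hb b (List.mem_cons_self ..)
    have h1 : t + 8 * (b :: bs).length = (t + 8) + 8 * bs.length := by
      simp [List.length_cons]; ring
    rw [h1, List.foldl_cons, ih (fun x hx => hb x (List.mem_cons_of_mem _ hx)) (t + 8),
      bitsN_step t a b hb', List.flatMap_cons]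
    simp

theorem map8 (m : Nat) :
    ([7, 6, 5, 4, 3, 2, 1, 0] : List Int).map
        (fun i => PySem.Int.band ((m : Int) >>> i.toNat) 1)
      = bitsN 8 m := by
  simp [bitsN, List.range_succ, PySem.Int.band_one]
  exact ⟨rfl, rfl, rfl, rfl, rfl, rfl, rfl, rfl⟩

-- characterisation of port A
theorem encode_bytes_py_eq (data : String) :
    encode_bytes_py data
      = bitsN 4 4 ++ bitsN 8 data.toList.length
          ++ data.toList.flatMap (fun c => bitsN 8 c.toNat) := by
  simp only [encode_bytes_py]
  rw [show PySem.List.pyRange 7 (-1) (-1) = [7, 6, 5, 4, 3, 2, 1, 0] from by decide]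
  simp only [PySem.List.foldl_append_singleton_eq_map, PySem.List.foldl_append_eq_flatMap]
  rw [show bitsN 4 4 = [0, 1, 0, 0] from by decide]
  simp only [List.flatMap_map, List.length_map, map8]
  simp

-- characterisation of port B
theorem encode_bytes_py_alt_eq (data : String)
    (hc : ∀ c ∈ data.toList, c.toNat < 256) :
    encode_bytes_py_alt data
      = bitsN (12 + 8 * data.toList.length)
          ((data.toList.map Char.toNat).foldl (fun x b => x * 256 + b)
            (4 * 256 + data.toList.length % 256)) := by
  simp only [encode_bytes_py_alt]
  set L := data.toList.length with hL
  have hlen : ((data.toList.map (fun c => ((c.toNat : Nat) : Int))).length : Int)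
      = ((L : Nat) : Int) := by simp [hL]
  rw [hlen]
  -- the initial accumulator is the natural number 4*256 + L % 256
  have hacc0 : PySem.Int.bor ((4 : Int) <<< 8) (PySem.Int.band ((L : Nat) : Int) 255)
      = ((4 * 256 + L % 256 : Nat) : Int) := by
    have hband : PySem.Int.band ((L : Nat) : Int) 255 = ((L % 256 : Nat) : Int) := by
      rw [show (255 : Int) = ((255 : Nat) : Int) from rfl, PySem.Int.band_natCast]
      congr 1
      have := Nat.and_two_pow_sub_one_eq_mod L 8
      norm_num at this
      omega
    rw [hband, show ((4 : Int) <<< 8) = ((1024 : Nat) : Int) from rfl,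
      PySem.Int.bor_natCast]
    congr 1
    rw [show (1024 : Nat) = 4 <<< 8 from by decide,
      lor256 4 (L % 256) (Nat.mod_lt _ (by norm_num))]
  rw [hacc0, List.foldl_map]
  -- the folded accumulator stays the corresponding natural number
  have hfold : ∀ (cs : List Char), (∀ c ∈ cs, c.toNat < 256) → ∀ (x : Nat),
      cs.foldl (fun a c => PySem.Int.bor (a <<< 8) (((c.toNat : Nat) : Int))) ((x : Nat) : Int)
        = (((cs.map Char.toNat).foldl (fun x b => x * 256 + b) x : Nat) : Int) := by
    intro cs
    induction cs with
    | nil => intro _ x; simp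
    | cons c cs ih =>
      intro h x
      rw [List.foldl_cons]
      have hstep : PySem.Int.bor ((((x : Nat) : Int)) <<< 8) (((c.toNat : Nat) : Int))
          = ((x * 256 + c.toNat : Nat) : Int) := by
        rw [show (((x : Nat) : Int) <<< 8) = ((x <<< 8 : Nat) : Int) from rfl,
          PySem.Int.bor_natCast]
        congr 1
        exact lor256 x c.toNat (h c (List.mem_cons_self ..))
      rw [hstep, ih (fun d hd => h d (List.mem_cons_of_mem _ hd)) _]
      simp
  rw [hfold data.toList hc]
  -- the final extraction pass is bitsN
  set A := (data.toList.map Char.toNat).foldl (fun x b => x * 256 + b) (4 * 256 + L % 256)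
    with hA
  have htot : (12 + 8 * ((L : Nat) : Int)) = (((12 + 8 * L : Nat) : Int)) := by push_cast; ring
  rw [htot, PySem.List.pyRange_one, List.map_map]
  unfold bitsN
  have hT : (((12 + 8 * L : Nat) : Int) - 0).toNat = 12 + 8 * L := by omega
  rw [hT]
  apply List.map_congr_left
  intro k hk
  rw [List.mem_range] at hk
  simp only [Function.comp]
  have hsh : (((12 + 8 * L : Nat) : Int) - 1 - (0 + (k : Int))).toNat = 12 + 8 * L - 1 - k := by
    omega
  rw [hsh]
  simp [PySem.Int.band_one]

theorem dom_codes_lt (data : String) (h : Dom_encode_bytes_py data) :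
    ∀ c ∈ data.toList, c.toNat < 256 := by
  intro c hc
  unfold Dom_encode_bytes_py pvDomStr at h
  rw [List.all_eq_true] at h
  have := h c hc
  unfold pvDomChar at this
  simp at this
  omega

-- ===== VERDICT (by name: the statement is the Claim_ definition above) =====
theorem encode_bytes_py_spec : Claim_equal_encode_bytes_py := by
  intro data hdom
  unfold Spec_encode_bytes_py
  have hc := dom_codes_lt data hdom
  rw [encode_bytes_py_eq data, encode_bytes_py_alt_eq data hc]
  have hb : ∀ b ∈ data.toList.map Char.toNat, b < 256 := by
    intro b hbm
    rw [List.mem_map] at hbm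
    obtain ⟨c, hcm, rfl⟩ := hbm
    exact hc c hcm
  have h1 : 12 + 8 * data.toList.length
      = 12 + 8 * (data.toList.map Char.toNat).length := by simp
  rw [h1, bitsN_fold _ hb 12 _, show (12 : Nat) = 4 + 8 from rfl,
    bitsN_step 4 4 (data.toList.length % 256) (Nat.mod_lt _ (by norm_num)),
    ← bitsN_eight_mod]
  simp [List.flatMap_map, List.append_assoc]
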